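-- pv_equiv track=rewrite | github.com/Maryam99911/projetchatbot | LoadGlobal.py | construire_contextes_consommation_electricite
-- ===== SOURCE A (Python) =====
-- def construire_contextes_consommation_electricite(data):
--     contexts = []
--     for entry in data:
--         location = entry.get('location', 'date inconnue')
--         maupertuis = entry.get('batiment_maupertuis', 'consommation inconnue')
--         bibliotheque_universitaire = entry.get('batiment_bibliotheque_universitaire', 'consommation inconnue')
--         pelvoux = entry.get('iup_pelvoux', 'consommation inconnue')
--         iut_romero = entry.get('batiment_iut_romero', 'consommation inconnue')
--         iut_rostand = entry.get('iut_rostand', 'consommation inconnue')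
--         ibgbi = entry.get('batiment_ibgbi', 'consommation inconnue')
--         premiers_cycles = entry.get('batiment_premiers_cycles', 'consommation inconnue')
--         facteur_cheval = entry.get('batiment_facteur_cheval', 'consommation inconnue')
--         ile_de_france = entry.get('batiment_ile_de_france', 'consommation inconnue')
--         iut_bretigny = entry.get('iut_bretigny', 'consommation inconnue')
--
--         context = (f"Pour la date '{location}', la consommation d'électricité par bâtiment est la suivante : "
--                    f"- Maupertuis : {maupertuis} kWh\n"
--                    f"- Bibliothèque Universitaire : {bibliotheque_universitaire} kWh\n"
--                    f"- IUP Pelvoux : {pelvoux} kWh\n"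
--                    f"- IUT Romero : {iut_romero} kWh\n"
--                    f"- IUT Rostand : {iut_rostand} kWh\n"
--                    f"- IBGBI : {ibgbi} kWh\n"
--                    f"- Premiers Cycles : {premiers_cycles} kWh\n"
--                    f"- Facteur Cheval : {facteur_cheval} kWh\n"
--                    f"- Île de France : {ile_de_france} kWh\n"
--                    f"- IUT Brétigny : {iut_bretigny} kWh")
--         contexts.append(context)
--     return contexts
-- ===== SOURCE B (Python) =====
-- BUILDINGS = [
--     ("batiment_maupertuis", "Maupertuis"),
--     ("batiment_bibliotheque_universitaire", "Bibliothèque Universitaire"),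
--     ("iup_pelvoux", "IUP Pelvoux"),
--     ("batiment_iut_romero", "IUT Romero"),
--     ("iut_rostand", "IUT Rostand"),
--     ("batiment_ibgbi", "IBGBI"),
--     ("batiment_premiers_cycles", "Premiers Cycles"),
--     ("batiment_facteur_cheval", "Facteur Cheval"),
--     ("batiment_ile_de_france", "Île de France"),
--     ("iut_bretigny", "IUT Brétigny"),
-- ]
--
--
-- def construire_contextes_consommation_electricite(data):
--     return [
--         f"Pour la date '{entry.get('location', 'date inconnue')}', "
--         "la consommation d'électricité par bâtiment est la suivante : "
--         + "\n".join(
--             f"- {label} : {entry.get(key, 'consommation inconnue')} kWh"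
--             for key, label in BUILDINGS
--         )
--         for entry in data
--     ]
-- ===== Notes on version B (the rewrite author's own statement) =====
-- stated objective: simpler
-- what changed: Replaces the ten hard-coded variables and the one big f-string block with a (key, label) table mapped to per-building lines joined with '\n', inside a list comprehension instead of an accumulator loop.
import Mathlib
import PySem

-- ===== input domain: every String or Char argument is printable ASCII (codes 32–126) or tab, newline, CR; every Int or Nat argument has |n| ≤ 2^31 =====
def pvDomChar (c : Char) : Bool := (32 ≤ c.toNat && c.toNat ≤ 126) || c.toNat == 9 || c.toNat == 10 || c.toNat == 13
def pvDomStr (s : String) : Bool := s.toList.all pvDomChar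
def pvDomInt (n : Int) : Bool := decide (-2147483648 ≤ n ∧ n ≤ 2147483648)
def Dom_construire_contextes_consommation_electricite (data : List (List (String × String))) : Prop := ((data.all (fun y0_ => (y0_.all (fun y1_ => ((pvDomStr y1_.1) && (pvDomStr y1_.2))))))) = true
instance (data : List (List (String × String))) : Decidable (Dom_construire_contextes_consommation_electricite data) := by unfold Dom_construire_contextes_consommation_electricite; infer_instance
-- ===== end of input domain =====

-- B rewrites the per-entry block of ten hard-coded f-string lines as a (key, label) table
-- mapped to lines and joined with "\n" (objective: simpler). Return-value equivalence only.

-- Python dict.get(k, d) on an association list (first match wins); used by both ports.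
def pvGet (e : List (String × String)) (k d : String) : String :=
  match e.find? (fun p => p.1 == k) with
  | some p => p.2
  | none => d

-- ===== PORT A =====
-- the per-entry f-string block of A, literal
def pvCtxA (entry : List (String × String)) : String :=
  let location := pvGet entry "location" "date inconnue"
  let maupertuis := pvGet entry "batiment_maupertuis" "consommation inconnue"
  let bibliotheque_universitaire := pvGet entry "batiment_bibliotheque_universitaire" "consommation inconnue"
  let pelvoux := pvGet entry "iup_pelvoux" "consommation inconnue"
  let iut_romero := pvGet entry "batiment_iut_romero" "consommation inconnue"
  let iut_rostand := pvGet entry "iut_rostand" "consommation inconnue"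
  let ibgbi := pvGet entry "batiment_ibgbi" "consommation inconnue"
  let premiers_cycles := pvGet entry "batiment_premiers_cycles" "consommation inconnue"
  let facteur_cheval := pvGet entry "batiment_facteur_cheval" "consommation inconnue"
  let ile_de_france := pvGet entry "batiment_ile_de_france" "consommation inconnue"
  let iut_bretigny := pvGet entry "iut_bretigny" "consommation inconnue"
  "Pour la date '" ++ location ++ "', la consommation d'électricité par bâtiment est la suivante : " ++
    "- Maupertuis : " ++ maupertuis ++ " kWh\n" ++
    "- Bibliothèque Universitaire : " ++ bibliotheque_universitaire ++ " kWh\n" ++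
    "- IUP Pelvoux : " ++ pelvoux ++ " kWh\n" ++
    "- IUT Romero : " ++ iut_romero ++ " kWh\n" ++
    "- IUT Rostand : " ++ iut_rostand ++ " kWh\n" ++
    "- IBGBI : " ++ ibgbi ++ " kWh\n" ++
    "- Premiers Cycles : " ++ premiers_cycles ++ " kWh\n" ++
    "- Facteur Cheval : " ++ facteur_cheval ++ " kWh\n" ++
    "- Île de France : " ++ ile_de_france ++ " kWh\n" ++
    "- IUT Brétigny : " ++ iut_bretigny ++ " kWh"

def construire_contextes_consommation_electricite (data : List (List (String × String))) : List String :=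
  data.foldl (fun contexts entry => contexts ++ [pvCtxA entry]) []

-- ===== PORT B =====
def pvBuildings : List (String × String) := [
  ("batiment_maupertuis", "Maupertuis"),
  ("batiment_bibliotheque_universitaire", "Bibliothèque Universitaire"),
  ("iup_pelvoux", "IUP Pelvoux"),
  ("batiment_iut_romero", "IUT Romero"),
  ("iut_rostand", "IUT Rostand"),
  ("batiment_ibgbi", "IBGBI"),
  ("batiment_premiers_cycles", "Premiers Cycles"),
  ("batiment_facteur_cheval", "Facteur Cheval"),
  ("batiment_ile_de_france", "Île de France"),
  ("iut_bretigny", "IUT Brétigny")]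

def pvCtxB (entry : List (String × String)) : String :=
  "Pour la date '" ++ pvGet entry "location" "date inconnue" ++ "', la consommation d'électricité par bâtiment est la suivante : " ++
    PySem.Str.join "\n" (pvBuildings.map (fun kl =>
      "- " ++ kl.2 ++ " : " ++ pvGet entry kl.1 "consommation inconnue" ++ " kWh"))

def construire_contextes_consommation_electricite_alt (data : List (List (String × String))) : List String :=
  data.map pvCtxB

-- ===== PRECONDITION & SPEC =====
def Spec_construire_contextes_consommation_electricite (data : List (List (String × String))) (out : List String) : Prop := out = construire_contextes_consommation_electricite_alt data
instance (data : List (List (String × String))) (out : List String) : Decidable (Spec_construire_contextes_consommation_electricite data out) := by unfold Spec_construire_contextes_consommation_electricite; infer_instance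

-- ===== CLAIM (what is proved, stated in full; the proofs are below) =====
def Claim_equal_construire_contextes_consommation_electricite : Prop := ∀ (data : List (List (String × String))), Dom_construire_contextes_consommation_electricite data → Spec_construire_contextes_consommation_electricite data (construire_contextes_consommation_electricite data)

-- ===== LEMMAS AND PROOFS =====
set_option maxRecDepth 4096 in
lemma pvCtx_eq (entry : List (String × String)) : pvCtxA entry = pvCtxB entry := by
  apply String.toList_inj.mp
  simp [pvCtxA, pvCtxB, pvBuildings, PySem.Str.join, PySem.Chars.join,
    List.intercalate, List.intersperse]

-- ===== VERDICT (by name: the statement is the Claim_ definition above) =====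
theorem construire_contextes_consommation_electricite_spec : Claim_equal_construire_contextes_consommation_electricite := by
  intro data _
  unfold Spec_construire_contextes_consommation_electricite
  unfold construire_contextes_consommation_electricite construire_contextes_consommation_electricite_alt
  rw [PySem.List.foldl_append_singleton_eq_map]
  exact List.map_congr_left (fun e _ => pvCtx_eq e)
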